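-- pv_equiv track=rewrite | github.com/binh-vu/semantic-modeling | pysm/experiments/arg_helper.py | get_sm_ids_by_name_range
-- ===== SOURCE A (Python) =====
-- def get_sm_ids_by_name_range(start_name, end_name, sm_ids):
--     start_idx, end_idx = None, None
--     for i, sid in enumerate(sm_ids):
--         if sid.startswith(start_name):
--             assert start_idx is None
--             start_idx = i
--         if sid.startswith(end_name):
--             assert end_idx is None
--             end_idx = i
--
--     assert start_idx <= end_idx
--     return sm_ids[start_idx:end_idx + 1]  # inclusive
-- ===== SOURCE B (Python) =====
-- def get_sm_ids_by_name_range(start_name, end_name, sm_ids):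
--     # Streaming three-phase scan over one shared iterator: skip to the start id,
--     # emit elements directly through the end id, then check the tail; each phase
--     # enforces uniqueness/order locally, so no indices and no slicing are needed.
--     it = iter(sm_ids)
--     # phase 1: before the start id (the end id may not occur here)
--     for sid in it:
--         if sid.startswith(start_name):
--             break
--         assert not sid.startswith(end_name), "end id before start id"
--     else:
--         raise AssertionError("start id not found")
--     window = [sid]
--     # phase 2: collect through the end id (no second start id)
--     if not sid.startswith(end_name):
--         for sid in it:
--             assert not sid.startswith(start_name), "duplicate start id"
--             window.append(sid)
--             if sid.startswith(end_name):
--                 break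
--         else:
--             raise AssertionError("end id not found")
--     # phase 3: nothing after the window may match either id
--     for sid in it:
--         assert not sid.startswith(start_name), "duplicate start id"
--         assert not sid.startswith(end_name), "duplicate end id"
--     return window
-- ===== Notes on version B (the rewrite author's own statement) =====
-- stated objective: alternative
-- what changed: Replaces A's single full indexed pass (enumerate, two Option index accumulators, trailing asserts, then a slice) by a streaming three-phase scan over one shared iterator that skips to the start id, emits the window elements directly through the end id, and validates the tail, with each phase enforcing uniqueness/order locally; no indices and no slicing.
import Mathlib
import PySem

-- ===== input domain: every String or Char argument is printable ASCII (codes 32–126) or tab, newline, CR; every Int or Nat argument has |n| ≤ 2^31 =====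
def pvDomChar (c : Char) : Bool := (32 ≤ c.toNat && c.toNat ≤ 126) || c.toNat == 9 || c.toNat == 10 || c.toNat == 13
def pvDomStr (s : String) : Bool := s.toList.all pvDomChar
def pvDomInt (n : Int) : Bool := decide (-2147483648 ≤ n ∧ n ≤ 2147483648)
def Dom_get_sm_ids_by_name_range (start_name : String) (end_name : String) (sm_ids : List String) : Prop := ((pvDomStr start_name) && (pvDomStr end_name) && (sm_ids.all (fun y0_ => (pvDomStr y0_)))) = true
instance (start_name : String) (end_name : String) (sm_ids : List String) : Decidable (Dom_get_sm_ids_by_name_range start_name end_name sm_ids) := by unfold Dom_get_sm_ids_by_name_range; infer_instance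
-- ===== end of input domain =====

-- B replaces A's full indexed pass + slice by a streaming two-phase scan that emits elements directly; equal wherever A returns.

-- ===== PORT A =====
-- the loop body of A: update (start_idx, end_idx) for one enumerated element
def pvStepA (start_name end_name : String) (p : Option Int × Option Int) (is : Int × String) : Option Int × Option Int :=
  let p1 := if PySem.Str.startswith is.2 start_name then (some is.1, p.2) else p
  if PySem.Str.startswith is.2 end_name then (p1.1, some is.1) else p1

-- Where the Python A raises (assert failure / None comparison) the port returns []; Pre_ excludes those inputs.
def get_sm_ids_by_name_range (start_name : String) (end_name : String) (sm_ids : List String) : List String :=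
  let st := (PySem.List.enumerate sm_ids 0).foldl (pvStepA start_name end_name) (none, none)
  match st.1, st.2 with
  | some a, some b => if a ≤ b then PySem.List.slice sm_ids (some a) (some (b + 1)) else []
  | _, _ => []

-- ===== PORT B =====
-- B's phase 1: skip elements before the start id; none = a raise (no start id, or an end id first)
def pvPhase1 (start_name end_name : String) : List String → Option (String × List String)
  | [] => none
  | x :: xs =>
    if PySem.Str.startswith x start_name then some (x, xs)
    else if PySem.Str.startswith x end_name then none
    else pvPhase1 start_name end_name xs

-- B's phase 2: append elements through the end id; none = a raise (second start id, or no end id)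
def pvPhase2 (start_name end_name : String) (window : List String) : List String → Option (List String × List String)
  | [] => none
  | x :: xs =>
    if PySem.Str.startswith x start_name then none
    else
      if PySem.Str.startswith x end_name then some (window ++ [x], xs)
      else pvPhase2 start_name end_name (window ++ [x]) xs

-- B's phase 3: no element after the window may match either id (false = a raise)
def pvPhase3 (start_name end_name : String) : List String → Bool
  | [] => true
  | x :: xs => !PySem.Str.startswith x start_name && !PySem.Str.startswith x end_name
      && pvPhase3 start_name end_name xs

-- Where the Python B raises (assert failure) the port returns []; Pre_ excludes those inputs.
def get_sm_ids_by_name_range_alt (start_name : String) (end_name : String) (sm_ids : List String) : List String :=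
  match pvPhase1 start_name end_name sm_ids with
  | none => []
  | some (sid, rest) =>
    match (if PySem.Str.startswith sid end_name then some ([sid], rest)
           else pvPhase2 start_name end_name [sid] rest) with
    | none => []
    | some (window, rest2) => if pvPhase3 start_name end_name rest2 then window else []

-- ===== PRECONDITION & SPEC =====
-- helper for Pre_ only: the (Int) indices of elements carrying the given prefix
def pvMatches (name : String) (sm_ids : List String) : List Int :=
  ((PySem.List.enumerate sm_ids 0).filter (fun is => PySem.Str.startswith is.2 name)).map (·.1)

-- Pre_ holds exactly when the Python A returns: a unique index starts with start_name, a unique one with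
-- end_name, and the former is not after the latter (otherwise A raises AssertionError or TypeError).
def Pre_get_sm_ids_by_name_range (start_name : String) (end_name : String) (sm_ids : List String) : Prop :=
  (pvMatches start_name sm_ids).length = 1 ∧ (pvMatches end_name sm_ids).length = 1 ∧
    (pvMatches start_name sm_ids).headD 0 ≤ (pvMatches end_name sm_ids).headD 0
instance (start_name : String) (end_name : String) (sm_ids : List String) : Decidable (Pre_get_sm_ids_by_name_range start_name end_name sm_ids) := by unfold Pre_get_sm_ids_by_name_range; infer_instance

def pvWitness_get_sm_ids_by_name_range : String × String × List String := ("a", "c", ["a1", "b", "c2", "d"])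

def Spec_get_sm_ids_by_name_range (start_name : String) (end_name : String) (sm_ids : List String) (out : List String) : Prop := out = get_sm_ids_by_name_range_alt start_name end_name sm_ids
instance (start_name : String) (end_name : String) (sm_ids : List String) (out : List String) : Decidable (Spec_get_sm_ids_by_name_range start_name end_name sm_ids out) := by unfold Spec_get_sm_ids_by_name_range; infer_instance

-- ===== CLAIM (what is proved, stated in full; the proofs are below) =====
def Claim_equal_get_sm_ids_by_name_range : Prop := ∀ (start_name : String) (end_name : String) (sm_ids : List String), Dom_get_sm_ids_by_name_range start_name end_name sm_ids → Pre_get_sm_ids_by_name_range start_name end_name sm_ids → Spec_get_sm_ids_by_name_range start_name end_name sm_ids (get_sm_ids_by_name_range start_name end_name sm_ids)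

-- ===== LEMMAS AND PROOFS =====

-- the Nat indices of elements carrying the given prefix (proof-side reference)
def pvIdxs (name : String) : List String → List Nat
  | [] => []
  | x :: xs => if PySem.Str.startswith x name then 0 :: (pvIdxs name xs).map (· + 1)
               else (pvIdxs name xs).map (· + 1)

theorem pvMatches_from (name : String) (l : List String) (k : Int) :
    ((PySem.List.enumerate l k).filter (fun is => PySem.Str.startswith is.2 name)).map (·.1)
      = (pvIdxs name l).map (fun n : Nat => k + (n : Int)) := by
  induction l generalizing k with
  | nil => simp [PySem.List.enumerate_nil, pvIdxs]
  | cons x xs ih =>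
    rw [PySem.List.enumerate_cons]
    by_cases h : PySem.Str.startswith x name
    · simp only [pvIdxs, h, List.filter_cons, if_pos, List.map_cons, List.map_map,
        Function.comp_def]
      rw [ih]
      refine List.cons_eq_cons.mpr ⟨by simp, List.map_congr_left (fun n _ => by push_cast; ring)⟩
    · simp only [pvIdxs, h, List.filter_cons, if_neg, Bool.false_eq_true, not_false_iff,
        List.map_map, Function.comp_def]
      rw [ih]
      exact List.map_congr_left (fun n _ => by push_cast; ring)

theorem pvMatches_eq (name : String) (l : List String) :
    pvMatches name l = (pvIdxs name l).map (fun n : Nat => (n : Int)) := by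
  rw [pvMatches, pvMatches_from]
  exact List.map_congr_left (fun n _ => by simp)

-- A's paired fold splits into two independent folds
theorem pvStepA_split (start_name end_name : String) (l : List (Int × String)) (p : Option Int × Option Int) :
    l.foldl (pvStepA start_name end_name) p =
      (l.foldl (fun a is => if PySem.Str.startswith is.2 start_name then some is.1 else a) p.1,
       l.foldl (fun a is => if PySem.Str.startswith is.2 end_name then some is.1 else a) p.2) := by
  induction l generalizing p with
  | nil => simp
  | cons x xs ih =>
    simp only [List.foldl_cons, ih, pvStepA]
    split_ifs <;> simp

-- each such fold is the fold over the filtered-and-projected list (keeping the last match)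
theorem pvFold_filter {α : Type} (f : Int × α → Bool) (l : List (Int × α)) (a0 : Option Int) :
    l.foldl (fun a is => if f is then some is.1 else a) a0 =
      ((l.filter f).map (·.1)).foldl (fun _ x => some x) a0 := by
  induction l generalizing a0 with
  | nil => rfl
  | cons x xs ih =>
    by_cases h : f x <;> simp [h, ih]

-- a singleton image under ·+1 comes from a singleton
theorem pvSingleton_map (l : List Nat) (b : Nat) (h : l.map (· + 1) = [b]) :
    ∃ b', l = [b'] ∧ b = b' + 1 := by
  cases l with
  | nil => simp at h
  | cons y ys =>
    cases ys with
    | nil => simp at h; exact ⟨y, rfl, h.symm⟩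
    | cons z zs => simp at h

-- no match index means no element carries the prefix
theorem pvIdxs_nil (name : String) (l : List String) :
    pvIdxs name l = [] ↔ ∀ x ∈ l, PySem.Str.startswith x name = false := by
  induction l with
  | nil => simp [pvIdxs]
  | cons x xs ih =>
    by_cases hx : PySem.Str.startswith x name
    · simp only [pvIdxs]
      rw [if_pos hx]
      constructor
      · intro h; cases h
      · intro h
        have hfalse := h x (List.mem_cons_self ..)
        rw [hx] at hfalse
        cases hfalse
    · simp only [pvIdxs]
      rw [if_neg hx]
      simp only [List.map_eq_nil_iff, ih, List.mem_cons]
      constructor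
      · rintro h y (rfl | hy)
        · simpa using hx
        · exact h y hy
      · intro h y hy
        exact h y (Or.inr hy)

-- past the unique match index there is no further match
theorem pvIdxs_drop_succ (name : String) (l : List String) (b : Nat)
    (h : pvIdxs name l = [b]) : pvIdxs name (l.drop (b + 1)) = [] := by
  induction l generalizing b with
  | nil => simp [pvIdxs] at h
  | cons x xs ih =>
    by_cases hx : PySem.Str.startswith x name
    · simp only [pvIdxs] at h
      rw [if_pos hx] at h
      obtain ⟨hb, hxs⟩ := List.cons_eq_cons.mp h
      subst hb
      simpa [List.map_eq_nil_iff] using hxs.symm ▸ (List.map_eq_nil_iff.mp hxs)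
    · simp only [pvIdxs] at h
      rw [if_neg hx] at h
      obtain ⟨b', hb', rfl⟩ := pvSingleton_map _ _ h
      simpa using ih b' hb'

-- B's phase 3 succeeds when no match remains
theorem pvPhase3_true (start_name end_name : String) (l : List String)
    (hs : pvIdxs start_name l = []) (he : pvIdxs end_name l = []) :
    pvPhase3 start_name end_name l = true := by
  induction l with
  | nil => rfl
  | cons x xs ih =>
    rw [pvIdxs_nil] at hs he
    simp only [pvPhase3, Bool.and_eq_true, Bool.not_eq_true']
    exact ⟨⟨hs x (List.mem_cons_self ..), he x (List.mem_cons_self ..)⟩,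
      ih (by rw [pvIdxs_nil]; exact fun y hy => hs y (List.mem_cons_of_mem _ hy))
         (by rw [pvIdxs_nil]; exact fun y hy => he y (List.mem_cons_of_mem _ hy))⟩

-- B's phase 2 collects exactly through the unique end match
theorem pvPhase2_eq (start_name end_name : String) (l : List String) (b : Nat)
    (he : pvIdxs end_name l = [b]) (hs : pvIdxs start_name l = [])
    (w : List String) :
    pvPhase2 start_name end_name w l = some (w ++ l.take (b + 1), l.drop (b + 1)) := by
  induction l generalizing w b with
  | nil => simp [pvIdxs] at he
  | cons x xs ih =>
    have hxs : PySem.Str.startswith x start_name = false :=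
      (pvIdxs_nil start_name (x :: xs)).mp hs x (List.mem_cons_self ..)
    have hs' : pvIdxs start_name xs = [] := by
      rw [pvIdxs_nil]
      exact fun y hy => (pvIdxs_nil start_name (x :: xs)).mp hs y (List.mem_cons_of_mem _ hy)
    by_cases hxe : PySem.Str.startswith x end_name
    · simp only [pvIdxs] at he
      rw [if_pos hxe] at he
      obtain ⟨hb, -⟩ := List.cons_eq_cons.mp he
      subst hb
      simp only [pvPhase2]
      rw [if_neg (by rw [hxs]; simp), if_pos hxe]
      simp
    · simp only [pvIdxs] at he
      rw [if_neg hxe] at he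
      obtain ⟨b', hb', rfl⟩ := pvSingleton_map _ _ he
      simp only [pvPhase2]
      rw [if_neg (by rw [hxs]; simp), if_neg hxe, ih _ hb' hs']
      simp

-- B equals the inclusive take-drop window of the unique match indices
theorem pvAlt_window (start_name end_name : String) (l : List String) (a b : Nat)
    (hs : pvIdxs start_name l = [a]) (he : pvIdxs end_name l = [b]) (hab : a ≤ b) :
    get_sm_ids_by_name_range_alt start_name end_name l = (l.drop a).take (b + 1 - a) := by
  induction l generalizing a b with
  | nil => simp [pvIdxs] at hs
  | cons x xs ih =>
    by_cases hx : PySem.Str.startswith x start_name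
    · simp only [pvIdxs] at hs
      rw [if_pos hx] at hs
      obtain ⟨ha, hs'⟩ := List.cons_eq_cons.mp hs
      subst ha
      have hs'' : pvIdxs start_name xs = [] := by simpa using hs'.symm
      unfold get_sm_ids_by_name_range_alt
      simp only [pvPhase1]
      rw [if_pos hx]
      dsimp only
      by_cases hxe : PySem.Str.startswith x end_name
      · simp only [pvIdxs] at he
        rw [if_pos hxe] at he
        obtain ⟨hb, he'⟩ := List.cons_eq_cons.mp he
        subst hb
        have he'' : pvIdxs end_name xs = [] := by simpa using he'.symm
        rw [if_pos hxe]
        simp [pvPhase3_true start_name end_name xs hs'' he'']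
      · simp only [pvIdxs] at he
        rw [if_neg hxe] at he
        obtain ⟨b', hb', rfl⟩ := pvSingleton_map _ _ he
        rw [if_neg hxe, pvPhase2_eq start_name end_name xs b' hb' hs'']
        have h3 : pvPhase3 start_name end_name (xs.drop (b' + 1)) = true :=
          pvPhase3_true _ _ _
            (by rw [pvIdxs_nil]
                exact fun y hy =>
                  (pvIdxs_nil start_name xs).mp hs'' y (List.mem_of_mem_drop hy))
            (pvIdxs_drop_succ end_name xs b' hb')
        simp [h3]
    · simp only [pvIdxs] at hs
      rw [if_neg hx] at hs
      obtain ⟨a', ha', rfl⟩ := pvSingleton_map _ _ hs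
      have hxe : ¬ PySem.Str.startswith x end_name := by
        intro hxe
        simp only [pvIdxs] at he
        rw [if_pos hxe] at he
        obtain ⟨hb, -⟩ := List.cons_eq_cons.mp he
        omega
      simp only [pvIdxs] at he
      rw [if_neg hxe] at he
      obtain ⟨b', hb', rfl⟩ := pvSingleton_map _ _ he
      have hab' : a' ≤ b' := by omega
      have hstep : get_sm_ids_by_name_range_alt start_name end_name (x :: xs)
          = get_sm_ids_by_name_range_alt start_name end_name xs := by
        unfold get_sm_ids_by_name_range_alt
        simp only [pvPhase1]
        rw [if_neg hx, if_neg hxe]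
      rw [hstep, ih a' b' ha' hb' hab', List.drop_succ_cons]
      congr 1
      omega

-- ===== VERDICT (by name: the statement is the Claim_ definition above) =====
theorem get_sm_ids_by_name_range_spec : Claim_equal_get_sm_ids_by_name_range := by
  intro start_name end_name sm_ids _ hpre
  obtain ⟨h1, h2, h3⟩ := hpre
  simp only [pvMatches_eq] at h1 h2 h3
  obtain ⟨a, ha⟩ : ∃ a, pvIdxs start_name sm_ids = [a] := by
    cases hs : pvIdxs start_name sm_ids with
    | nil => simp [hs] at h1
    | cons y ys => cases ys with
      | nil => exact ⟨y, rfl⟩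
      | cons z zs => simp [hs] at h1
  obtain ⟨b, hb⟩ : ∃ b, pvIdxs end_name sm_ids = [b] := by
    cases hs : pvIdxs end_name sm_ids with
    | nil => simp [hs] at h2
    | cons y ys => cases ys with
      | nil => exact ⟨y, rfl⟩
      | cons z zs => simp [hs] at h2
  rw [ha, hb] at h3
  simp only [List.map_cons, List.map_nil, List.headD] at h3
  have hab : a ≤ b := by exact_mod_cast h3
  unfold Spec_get_sm_ids_by_name_range get_sm_ids_by_name_range
  rw [pvStepA_split, pvFold_filter, pvFold_filter, pvMatches_from, pvMatches_from, ha, hb]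
  have hcast : ∀ n : Nat, (0 : Int) + (n : Int) = (n : Int) := by intro n; ring
  simp only [List.map_cons, List.map_nil, List.foldl_cons, List.foldl_nil, hcast]
  have hb1 : (b : Int) + 1 = ((b + 1 : Nat) : Int) := by push_cast; ring
  rw [if_pos (by exact_mod_cast hab), hb1, PySem.List.slice_natCast,
    pvAlt_window start_name end_name sm_ids a b ha hb hab]
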